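-- pv_equiv track=rewrite | github.com/dezgit2025/oclaw-vm | ops/session-gc/session_gc.py | tail_to_fit
-- ===== SOURCE A (Python) =====
-- from typing import List, Tuple
--
-- def tail_to_fit(header: List[str], body: List[str], target_bytes: int) -> List[str]:
--     hb = sum(len(x.encode("utf-8", errors="replace")) for x in header)
--     if hb >= target_bytes:
--         # Header alone exceeds target; keep header only (best effort).
--         return header
--
--     remaining = target_bytes - hb
--
--     out_body: List[str] = []
--     acc = 0
--     # Take from the end until we reach remaining bytes.
--     for ln in reversed(body):
--         b = len(ln.encode("utf-8", errors="replace"))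
--         if acc + b > remaining and out_body:
--             break
--         if b > remaining and not out_body:
--             # Single gigantic line; keep it (can't do better without partial-line surgery).
--             out_body.append(ln)
--             acc += b
--             break
--         out_body.append(ln)
--         acc += b
--
--     out_body.reverse()
--     return header + out_body
-- ===== SOURCE B (Python) =====
-- from typing import List
--
-- def tail_to_fit(header: List[str], body: List[str], target_bytes: int) -> List[str]:
--     hb = sum(len(x.encode("utf-8", errors="replace")) for x in header)
--     if hb >= target_bytes:
--         return header
--     remaining = target_bytes - hb
--     n = len(body)
--     # suf[k] = total bytes of the last k lines of body (monotone non-decreasing).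
--     suf = [0] * (n + 1)
--     for i in range(1, n + 1):
--         suf[i] = suf[i - 1] + len(body[n - i].encode("utf-8", errors="replace"))
--     # Binary search for the largest k with suf[k] <= remaining.
--     lo, hi = 0, n
--     while lo < hi:
--         mid = (lo + hi + 1) // 2
--         if suf[mid] <= remaining:
--             lo = mid
--         else:
--             hi = mid - 1
--     k = lo
--     if n > 0 and k == 0:
--         k = 1  # keep one giant line, as the task demands
--     return header + body[n - k:]
-- ===== Notes on version B (the rewrite author's own statement) =====
-- stated objective: alternative
-- what changed: A's greedy stateful reverse scan with break conditions is replaced by building a suffix-sum table of per-line byte lengths and binary-searching it for the largest line count fitting the remaining budget, clamping to one line for a non-empty body.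
import Mathlib
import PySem

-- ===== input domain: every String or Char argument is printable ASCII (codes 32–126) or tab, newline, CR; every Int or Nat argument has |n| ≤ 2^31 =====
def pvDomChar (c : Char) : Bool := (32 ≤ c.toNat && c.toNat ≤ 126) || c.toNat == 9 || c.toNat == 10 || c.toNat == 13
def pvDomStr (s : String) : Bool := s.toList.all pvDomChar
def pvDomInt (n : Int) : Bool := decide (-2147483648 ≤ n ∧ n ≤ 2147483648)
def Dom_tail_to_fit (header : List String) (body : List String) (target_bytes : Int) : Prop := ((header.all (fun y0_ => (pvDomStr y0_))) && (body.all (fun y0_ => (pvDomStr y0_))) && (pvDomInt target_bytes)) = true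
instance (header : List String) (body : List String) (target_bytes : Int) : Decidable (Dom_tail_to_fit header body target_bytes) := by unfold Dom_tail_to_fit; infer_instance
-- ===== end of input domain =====

-- B replaces A's stateful greedy reverse scan by a suffix-sum table plus binary search (alternative decomposition, same result).
-- On the ASCII input domain len(x.encode("utf-8")) equals the character count, so both ports use PySem.Str.len (exact on Dom).

-- ===== PORT A =====
-- the for-loop over reversed(body): state (out_body, acc); break → return the state
def pvLoopA (remaining : Int) : List String → List String → Int → List String
  | [], out, _ => out
  | ln :: rest, out, acc =>
    if acc + PySem.Str.len ln > remaining ∧ out ≠ [] then out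
    else if PySem.Str.len ln > remaining ∧ out = [] then out ++ [ln]
    else pvLoopA remaining rest (out ++ [ln]) (acc + PySem.Str.len ln)

def tail_to_fit (header : List String) (body : List String) (target_bytes : Int) : List String :=
  let hb := (header.map PySem.Str.len).sum
  if hb ≥ target_bytes then header
  else
    let remaining := target_bytes - hb
    let out_body := pvLoopA remaining body.reverse [] 0
    header ++ out_body.reverse

-- ===== PORT B =====
-- suf[i] = suf[i-1] + len(body[n-i]): running sums over the byte lengths of body read back-to-front
def pvMkSuf : List Int → Int → List Int
  | [], _ => []
  | b :: t, acc => (acc + b) :: pvMkSuf t (acc + b)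

-- the while lo < hi loop of B's binary search (mid = (lo+hi+1)//2)
def pvBS (suf : List Int) (remaining : Int) (lo hi : Nat) : Nat :=
  if h : lo < hi then
    if suf.getD ((lo + hi + 1) / 2) 0 ≤ remaining then pvBS suf remaining ((lo + hi + 1) / 2) hi
    else pvBS suf remaining lo ((lo + hi + 1) / 2 - 1)
  else lo
termination_by hi - lo
decreasing_by all_goals omega

def tail_to_fit_alt (header : List String) (body : List String) (target_bytes : Int) : List String :=
  let hb := (header.map PySem.Str.len).sum
  if hb ≥ target_bytes then header
  else
    let remaining := target_bytes - hb
    let n := body.length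
    let suf := 0 :: pvMkSuf (body.reverse.map PySem.Str.len) 0
    let k0 := pvBS suf remaining 0 n
    let k := if 0 < n ∧ k0 = 0 then 1 else k0
    header ++ body.drop (n - k)

-- ===== PRECONDITION & SPEC =====
def Spec_tail_to_fit (header : List String) (body : List String) (target_bytes : Int) (out : List String) : Prop := out = tail_to_fit_alt header body target_bytes
instance (header : List String) (body : List String) (target_bytes : Int) (out : List String) : Decidable (Spec_tail_to_fit header body target_bytes out) := by unfold Spec_tail_to_fit; infer_instance

-- ===== CLAIM (what is proved, stated in full; the proofs are below) =====
def Claim_equal_tail_to_fit : Prop := ∀ (header : List String) (body : List String) (target_bytes : Int), Dom_tail_to_fit header body target_bytes → Spec_tail_to_fit header body target_bytes (tail_to_fit header body target_bytes)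

-- ===== LEMMAS AND PROOFS =====

-- proof-only helper: the number of lines A's plain loop takes, given accumulated bytes acc
def pvCnt (r : Int) : List Int → Int → Nat
  | [], _ => 0
  | b :: t, acc => if acc + b > r then 0 else pvCnt r t (acc + b) + 1

lemma pv_rev_take {α : Type} (l : List α) (k : Nat) :
    (l.reverse.take k).reverse = l.drop (l.length - k) := by
  rw [← List.rtake_eq_reverse_take_reverse]; rfl

lemma pvMkSuf_getD (ls : List Int) (acc : Int) (i : Nat) (h : i ≤ ls.length) :
    (acc :: pvMkSuf ls acc).getD i 0 = acc + (ls.take i).sum := by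
  induction ls generalizing acc i with
  | nil =>
    simp only [List.length_nil, Nat.le_zero] at h
    subst h; simp
  | cons b t ih =>
    cases i with
    | zero => simp
    | succ j =>
      have := ih (acc + b) j (by simpa using h)
      simp only [pvMkSuf, List.getD_cons_succ, List.take_succ_cons, List.sum_cons] at *
      omega

lemma sum_take_mono (ls : List Int) (hnn : ∀ x ∈ ls, 0 ≤ x) :
    ∀ i j : Nat, i ≤ j → (ls.take i).sum ≤ (ls.take j).sum := by
  intro i j hij
  induction j with
  | zero => simp_all
  | succ j ih =>
    rcases Nat.lt_or_ge i (j+1) with h | h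
    · have step : (ls.take j).sum ≤ (ls.take (j+1)).sum := by
        rw [List.take_add_one]
        rcases h' : ls[j]? with _ | x
        · simp
        · have : 0 ≤ x := hnn x (List.mem_of_getElem? h')
          simp; omega
      exact le_trans (ih (by omega)) step
    · have : i = j + 1 := by omega
      simp [this]

lemma pvBS_spec (suf : List Int) (r : Int) (n : Nat)
    (Hdc : ∀ i j : Nat, i ≤ j → j ≤ n → suf.getD j 0 ≤ r → suf.getD i 0 ≤ r) :
    ∀ d lo hi : Nat, hi - lo ≤ d → lo ≤ hi → hi ≤ n → suf.getD lo 0 ≤ r →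
      (∀ j, hi < j → j ≤ n → ¬ suf.getD j 0 ≤ r) →
      lo ≤ pvBS suf r lo hi ∧ pvBS suf r lo hi ≤ hi ∧
      suf.getD (pvBS suf r lo hi) 0 ≤ r ∧
      (∀ j, pvBS suf r lo hi < j → j ≤ n → ¬ suf.getD j 0 ≤ r) := by
  intro d
  induction d with
  | zero =>
    intro lo hi hd hle hhn hP hfail
    have heq : lo = hi := by omega
    subst heq
    have e : pvBS suf r lo lo = lo := by rw [pvBS]; simp
    rw [e]
    exact ⟨le_refl _, le_refl _, hP, hfail⟩
  | succ d ih =>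
    intro lo hi hd hle hhn hP hfail
    rw [pvBS]
    by_cases h : lo < hi
    · rw [dif_pos h]
      have hm1 : lo < (lo + hi + 1) / 2 := by omega
      have hm2 : (lo + hi + 1) / 2 ≤ hi := by omega
      by_cases hq : suf.getD ((lo + hi + 1) / 2) 0 ≤ r
      · rw [if_pos hq]
        have IH := ih ((lo + hi + 1) / 2) hi (by omega) (by omega) hhn hq hfail
        exact ⟨by omega, IH.2.1, IH.2.2⟩
      · rw [if_neg hq]
        have hfail' : ∀ j, (lo + hi + 1) / 2 - 1 < j → j ≤ n → ¬ suf.getD j 0 ≤ r := by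
          intro j hj hjn hPj
          rcases Nat.lt_or_ge hi j with hcase | hcase
          · exact hfail j hcase hjn hPj
          · exact hq (Hdc ((lo + hi + 1) / 2) j (by omega) (by omega) hPj)
        have IH := ih lo ((lo + hi + 1) / 2 - 1) (by omega) (by omega) (by omega) hP hfail'
        exact ⟨IH.1, by omega, IH.2.2⟩
    · rw [dif_neg h]
      have heq : lo = hi := by omega
      subst heq
      exact ⟨le_refl _, le_refl _, hP, hfail⟩

lemma pvLoopA_plain (r : Int) :
    ∀ (ls : List String) (out : List String) (acc : Int), out ≠ [] →
      pvLoopA r ls out acc = out ++ ls.take (pvCnt r (ls.map PySem.Str.len) acc) := by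
  intro ls
  induction ls with
  | nil => intro out acc _; simp [pvLoopA, pvCnt]
  | cons ln rest ih =>
    intro out acc hne
    rw [pvLoopA]
    simp only [List.map_cons, pvCnt]
    by_cases hb : acc + PySem.Str.len ln > r
    · rw [if_pos ⟨hb, hne⟩, if_pos hb]
      simp
    · have h1 : ¬ (acc + PySem.Str.len ln > r ∧ out ≠ []) := by tauto
      have h2 : ¬ (PySem.Str.len ln > r ∧ out = []) := by tauto
      rw [if_neg h1, if_neg h2, if_neg hb, ih (out ++ [ln]) (acc + PySem.Str.len ln) (by simp)]
      simp [List.take_succ_cons]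

lemma pvCnt_le_length (r : Int) : ∀ (L : List Int) (a : Int), pvCnt r L a ≤ L.length := by
  intro L
  induction L with
  | nil => intro a; simp [pvCnt]
  | cons x t ih =>
    intro a
    by_cases hx : a + x > r
    · simp [pvCnt, hx]
    · simp only [pvCnt, if_neg hx, List.length_cons]
      have := ih (a + x); omega

lemma pvCnt_spec (r : Int) :
    ∀ (lens : List Int) (acc : Int), acc ≤ r →
      acc + ((lens.take (pvCnt r lens acc)).sum) ≤ r ∧
      (pvCnt r lens acc = lens.length ∨
        r < acc + (lens.take (pvCnt r lens acc + 1)).sum) := by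
  intro lens
  induction lens with
  | nil => intro acc hacc; simp [pvCnt, hacc]
  | cons b t ih =>
    intro acc hacc
    by_cases hb : acc + b > r
    · constructor
      · simp only [pvCnt, if_pos hb, List.take_zero, List.sum_nil]; omega
      · right
        simp only [pvCnt, if_pos hb, Nat.zero_add, List.take_succ_cons, List.take_zero,
          List.sum_cons, List.sum_nil]
        omega
    · have hih := ih (acc + b) (by omega)
      constructor
      · simp only [pvCnt, if_neg hb, List.take_succ_cons, List.sum_cons]
        have := hih.1; omega
      · rcases hih.2 with h | h
        · left; simp only [pvCnt, if_neg hb, List.length_cons]; omega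
        · right
          simp only [pvCnt, if_neg hb, List.take_succ_cons, List.sum_cons]
          omega

lemma pv_len_nonneg (s : String) : 0 ≤ PySem.Str.len s := by
  simp [PySem.Str.len_eq]

-- the unique k ≤ n with S k ≤ r and (k = n ∨ r < S (k+1)), S monotone
lemma pv_uniq (S : Nat → Int) (r : Int) (n : Nat)
    (mono : ∀ i j : Nat, i ≤ j → S i ≤ S j)
    (k1 k2 : Nat) (h1n : k1 ≤ n) (h2n : k2 ≤ n)
    (h1 : S k1 ≤ r) (h2 : S k2 ≤ r)
    (b1 : k1 = n ∨ r < S (k1 + 1)) (b2 : k2 = n ∨ r < S (k2 + 1)) : k1 = k2 := by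
  rcases Nat.lt_trichotomy k1 k2 with h | h | h
  · rcases b1 with rfl | hlt
    · omega
    · exact absurd (le_trans (mono (k1+1) k2 (by omega)) h2) (by omega)
  · exact h
  · rcases b2 with rfl | hlt
    · omega
    · exact absurd (le_trans (mono (k2+1) k1 (by omega)) h1) (by omega)

theorem pv_main (header body : List String) (target_bytes : Int) :
    tail_to_fit header body target_bytes = tail_to_fit_alt header body target_bytes := by
  unfold tail_to_fit tail_to_fit_alt
  by_cases hhb : (header.map PySem.Str.len).sum ≥ target_bytes
  · simp [hhb]
  · simp only [if_neg hhb]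
    set r := target_bytes - (header.map PySem.Str.len).sum with hr
    have hrpos : 1 ≤ r := by omega
    set ls := body.reverse with hls
    set lens := ls.map PySem.Str.len with hlens
    have hnn : ∀ x ∈ lens, 0 ≤ x := by
      intro x hx
      rcases List.mem_map.mp hx with ⟨s, _, rfl⟩
      exact pv_len_nonneg s
    set n := body.length with hn
    have hlenlens : lens.length = n := by simp [hlens, hls, hn]
    set S : Nat → Int := fun i => (lens.take i).sum with hS
    have hmono : ∀ i j : Nat, i ≤ j → S i ≤ S j := fun i j hij => sum_take_mono lens hnn i j hij
    have hsuf : ∀ i : Nat, i ≤ n → (0 :: pvMkSuf lens 0).getD i 0 = S i := by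
      intro i hi
      rw [pvMkSuf_getD lens 0 i (by omega)]; simp [hS]
    have hdc : ∀ i j : Nat, i ≤ j → j ≤ n → (0 :: pvMkSuf lens 0).getD j 0 ≤ r →
        (0 :: pvMkSuf lens 0).getD i 0 ≤ r := by
      intro i j hij hjn hP
      rw [hsuf i (by omega)]
      rw [hsuf j hjn] at hP
      exact le_trans (hmono i j hij) hP
    have hbs := pvBS_spec (0 :: pvMkSuf lens 0) r n hdc n 0 n (by omega) (by omega) (le_refl n)
      (by simp only [List.getD_cons_zero]; omega)
      (by intro j hj hjn; omega)
    set K := pvBS (0 :: pvMkSuf lens 0) r 0 n with hK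
    have hKn : K ≤ n := hbs.2.1
    have hKle : S K ≤ r := by rw [← hsuf K hKn]; exact hbs.2.2.1
    have hKtop : K = n ∨ r < S (K + 1) := by
      rcases Nat.lt_or_ge K n with h | h
      · right
        have := hbs.2.2.2 (K + 1) (by omega) (by omega)
        rw [hsuf (K+1) (by omega)] at this; omega
      · left; omega
    rcases hlsc : ls with _ | ⟨ln, rest⟩
    · -- body is empty: both return header
      have hbody : body = [] := by
        have := congrArg List.reverse hlsc
        simpa [hls] using this
      subst hbody
      simp [pvLoopA, hn]
    · have hnpos : 0 < n := by
        have hlslen : ls.length = n := by simp [hls, hn]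
        rw [hlsc] at hlslen; simp at hlslen; omega
      have hlens1 : lens = PySem.Str.len ln :: rest.map PySem.Str.len := by
        rw [hlens, hlsc]; simp
      have h1' : ¬ (0 + PySem.Str.len ln > r ∧ ([] : List String) ≠ []) := by simp
      by_cases hble : PySem.Str.len ln ≤ r
      · -- first (= last of body) line fits: A takes pvCnt … + 1 lines, equal to B's K
        set c := pvCnt r (rest.map PySem.Str.len) (PySem.Str.len ln) with hc
        have hA : pvLoopA r ls [] 0 = ls.take (c + 1) := by
          rw [hlsc, pvLoopA, if_neg h1',
            if_neg (show ¬ (PySem.Str.len ln > r ∧ ([] : List String) = []) by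
              intro hcontr; exact absurd hcontr.1 (not_lt.mpr hble))]
          simp only [List.nil_append, zero_add]
          rw [pvLoopA_plain r rest [ln] (PySem.Str.len ln) (by simp)]
          simp [List.take_succ_cons, hc]
        have hcnt := pvCnt_spec r (rest.map PySem.Str.len) (PySem.Str.len ln) hble
        have hrestlen : (rest.map PySem.Str.len).length + 1 = n := by
          have := hlenlens
          rw [hlens1] at this; simpa using this
        have hSc1 : S (c + 1) = PySem.Str.len ln + ((rest.map PySem.Str.len).take c).sum := by
          simp only [hS]; rw [hlens1]
          simp [List.take_succ_cons, hc]
        have hSkA : S (c + 1) ≤ r := by rw [hSc1]; exact hcnt.1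
        have hkAn : c + 1 ≤ n := by
          have := pvCnt_le_length r (rest.map PySem.Str.len) (PySem.Str.len ln)
          omega
        have hkAtop : c + 1 = n ∨ r < S (c + 1 + 1) := by
          rcases hcnt.2 with h | h
          · left; omega
          · right
            have hSc2 : S (c + 1 + 1) = PySem.Str.len ln + ((rest.map PySem.Str.len).take (c + 1)).sum := by
              simp only [hS]; rw [hlens1]
              simp [List.take_succ_cons, hc]
            rw [hSc2]; omega
        have hKeq : K = c + 1 :=
          pv_uniq S r n (fun i j hij => hmono i j hij) K (c + 1) hKn hkAn hKle hSkA hKtop hkAtop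
        have hKpos : ¬ (0 < n ∧ K = 0) := by
          intro hcontr; omega
        rw [← hlsc, hA]
        rw [if_neg hKpos, hKeq]
        congr 1
        rw [hls, hn]
        exact pv_rev_take body (c + 1)
      · -- first (= last of body) line alone exceeds remaining: A keeps just it; B's K = 0, clamped to 1
        have hbgt : r < PySem.Str.len ln := not_le.mp hble
        have hA : pvLoopA r ls [] 0 = [ln] := by
          rw [hlsc, pvLoopA, if_neg h1', if_pos ⟨hbgt, rfl⟩]
          simp
        have hK0 : K = 0 := by
          by_contra hne
          have h1K : 1 ≤ K := Nat.one_le_iff_ne_zero.mpr hne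
          have hle := le_trans (hmono 1 K h1K) hKle
          have hS1 : S 1 = PySem.Str.len ln := by
            simp only [hS]; rw [hlens1]; simp
          rw [hS1] at hle
          exact absurd hle (not_le.mpr hbgt)
        have hcl : (0 < n ∧ K = 0) := ⟨hnpos, hK0⟩
        have hdrop : body.drop (n - 1) = [ln] := by
          have h1 := pv_rev_take body 1
          rw [← hls, hlsc] at h1
          simpa [hn] using h1.symm
        rw [← hlsc, hA, if_pos hcl, hdrop]
        simp

-- ===== VERDICT (by name: the statement is the Claim_ definition above) =====
theorem tail_to_fit_spec : Claim_equal_tail_to_fit := by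
  intro header body target_bytes _
  unfold Spec_tail_to_fit
  exact pv_main header body target_bytes
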